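-- pv_equiv track=rewrite | github.com/z243802480/mult_agent_code | src/agent_runtime/core/task_contract.py | _changed_expected_file
-- ===== SOURCE A (Python) =====
-- def _changed_expected_file(expected_files: list[str], changed_files: list[str]) -> bool:
--     changed = {_normalize_path(item) for item in changed_files}
--     for expected in expected_files:
--         normalized = _normalize_path(expected)
--         if normalized in changed:
--             return True
--         if normalized.endswith("/") and any(item.startswith(normalized) for item in changed):
--             return True
--     return False
--
-- def _normalize_path(value: str) -> str:
--     return value.replace("\\", "/").strip()
-- ===== SOURCE B (Python) =====
-- def _changed_expected_file(expected_files: list[str], changed_files: list[str]) -> bool: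
--     # Index the EXPECTED side once (exact-match set + list of directory prefixes),
--     # then make a single pass over the changed files.
--     exact = set()
--     dir_prefixes = []
--     for expected in expected_files:
--         normalized = expected.replace("\\", "/").strip()
--         exact.add(normalized)
--         if normalized.endswith("/"):
--             dir_prefixes.append(normalized)
--     for item in changed_files:
--         normalized = item.replace("\\", "/").strip()
--         if normalized in exact:
--             return True
--         if any(normalized.startswith(prefix) for prefix in dir_prefixes):
--             return True
--     return False
-- ===== Notes on version B (the rewrite author's own statement) =====
-- stated objective: alternative
-- what changed: Inverted the traversal: instead of looping over expected files and rescanning the set of changed paths for each directory prefix, B indexes the expected side once (exact-match set plus a list of directory prefixes) and makes a single early-exit pass over the changed files.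
import Mathlib
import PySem

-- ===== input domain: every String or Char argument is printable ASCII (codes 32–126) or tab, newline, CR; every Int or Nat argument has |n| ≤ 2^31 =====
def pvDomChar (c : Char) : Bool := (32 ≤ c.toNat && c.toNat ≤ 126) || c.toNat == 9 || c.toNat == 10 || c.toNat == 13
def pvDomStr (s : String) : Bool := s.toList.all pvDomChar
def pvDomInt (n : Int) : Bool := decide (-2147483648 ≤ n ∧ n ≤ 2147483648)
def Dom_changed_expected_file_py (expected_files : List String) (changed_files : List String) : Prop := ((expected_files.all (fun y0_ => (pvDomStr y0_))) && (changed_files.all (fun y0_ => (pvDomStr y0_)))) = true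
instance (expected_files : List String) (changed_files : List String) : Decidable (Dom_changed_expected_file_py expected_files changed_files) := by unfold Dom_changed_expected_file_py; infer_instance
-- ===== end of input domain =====

-- B inverts the traversal: it indexes the expected side once (exact-match set + directory-prefix
-- list) and then makes a single early-exit pass over the changed files (objective: alternative).

-- ===== PORT A =====
-- _normalize_path(value) = value.replace("\\", "/").strip()
def pvNorm (value : String) : String := PySem.Str.strip (PySem.Str.replace value "\\" "/")

-- the `for expected in expected_files` loop with its two early returns
def pvLoopA (changed : PySem.Set String) : List String → Bool
  | [] => false
  | expected :: rest =>
    let normalized := pvNorm expected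
    if PySem.Set.contains changed normalized then true
    else if PySem.Str.endswith normalized "/" &&
            changed.any (fun item => PySem.Str.startswith item normalized) then true
    else pvLoopA changed rest

def changed_expected_file_py (expected_files : List String) (changed_files : List String) : Bool :=
  pvLoopA (PySem.Set.ofList (changed_files.map pvNorm)) expected_files

-- ===== PORT B =====
-- the indexing pass over expected_files: accumulates (exact set, dir_prefixes)
def pvStepB (acc : PySem.Set String × List String) (expected : String) : PySem.Set String × List String :=
  let normalized := pvNorm expected
  (PySem.Set.add acc.1 normalized,
   if PySem.Str.endswith normalized "/" then acc.2 ++ [normalized] else acc.2)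

-- the early-exit pass over changed_files
def pvLoopB (exact : PySem.Set String) (dirPrefixes : List String) : List String → Bool
  | [] => false
  | item :: rest =>
    let normalized := pvNorm item
    if PySem.Set.contains exact normalized then true
    else if dirPrefixes.any (fun p => PySem.Str.startswith normalized p) then true
    else pvLoopB exact dirPrefixes rest

def changed_expected_file_py_alt (expected_files : List String) (changed_files : List String) : Bool :=
  let acc := expected_files.foldl pvStepB (PySem.Set.empty, [])
  pvLoopB acc.1 acc.2 changed_files

-- ===== PRECONDITION & SPEC =====
def Spec_changed_expected_file_py (expected_files : List String) (changed_files : List String) (out : Bool) : Prop := out = changed_expected_file_py_alt expected_files changed_files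
instance (expected_files : List String) (changed_files : List String) (out : Bool) : Decidable (Spec_changed_expected_file_py expected_files changed_files out) := by unfold Spec_changed_expected_file_py; infer_instance

-- ===== CLAIM (what is proved, stated in full; the proofs are below) =====
def Claim_equal_changed_expected_file_py : Prop := ∀ (expected_files : List String) (changed_files : List String), Dom_changed_expected_file_py expected_files changed_files → Spec_changed_expected_file_py expected_files changed_files (changed_expected_file_py expected_files changed_files)

-- ===== LEMMAS AND PROOFS =====

-- the matching relation both programs decide the existence of
def pvHit (e c : String) : Prop :=
  pvNorm e = pvNorm c ∨
  (PySem.Str.endswith (pvNorm e) "/" = true ∧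
   PySem.Str.startswith (pvNorm c) (pvNorm e) = true)

theorem pvLoopA_iff (cf : List String) (es : List String) :
    pvLoopA (PySem.Set.ofList (cf.map pvNorm)) es = true ↔
    ∃ e ∈ es, ∃ c ∈ cf, pvHit e c := by
  induction es with
  | nil => simp [pvLoopA]
  | cons e rest ih =>
    simp only [pvLoopA]
    split_ifs with h1 h2
    · rw [PySem.Set.contains_iff, PySem.Set.mem_ofList, List.mem_map] at h1
      obtain ⟨c, hc, hcn⟩ := h1
      simp only [true_iff]
      exact ⟨e, by simp, c, hc, Or.inl hcn.symm⟩
    · rw [Bool.and_eq_true, List.any_eq_true] at h2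
      obtain ⟨hend, x, hx, hsw⟩ := h2
      rw [PySem.Set.mem_ofList, List.mem_map] at hx
      obtain ⟨c, hc, rfl⟩ := hx
      simp only [true_iff]
      exact ⟨e, by simp, c, hc, Or.inr ⟨hend, hsw⟩⟩
    · rw [ih]
      constructor
      · rintro ⟨e', he', hc⟩; exact ⟨e', by simp [he'], hc⟩
      · rintro ⟨e', he', c, hc, hit⟩
        rcases List.mem_cons.mp he' with rfl | he'
        · exfalso
          rcases hit with heq | ⟨hend, hsw⟩
          · exact h1 (by
              rw [PySem.Set.contains_iff, PySem.Set.mem_ofList, List.mem_map]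
              exact ⟨c, hc, heq.symm⟩)
          · exact h2 (by
              rw [Bool.and_eq_true, List.any_eq_true]
              exact ⟨hend, pvNorm c, (PySem.Set.mem_ofList _ _).mpr (List.mem_map.mpr ⟨c, hc, rfl⟩), hsw⟩)
        · exact ⟨e', he', c, hc, hit⟩

theorem pvBuild_eq (es : List String) (s : PySem.Set String) (ps : List String) :
    es.foldl pvStepB (s, ps) =
      (es.foldl (fun t e => PySem.Set.add t (pvNorm e)) s,
       ps ++ (es.map pvNorm).filter (fun n => PySem.Str.endswith n "/")) := by
  induction es generalizing s ps with
  | nil => simp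
  | cons e rest ih =>
    simp only [List.foldl_cons, List.map_cons, List.filter_cons, pvStepB]
    rw [ih]
    by_cases h : PySem.Chars.endswith (pvNorm e).toList ['/'] = true
    · simp [h]
    · simp [h]

theorem pvLoopB_iff (exact : PySem.Set String) (ps : List String) (cs : List String) :
    pvLoopB exact ps cs = true ↔
    ∃ c ∈ cs, (pvNorm c ∈ exact ∨ ∃ p ∈ ps, PySem.Str.startswith (pvNorm c) p = true) := by
  induction cs with
  | nil => simp [pvLoopB]
  | cons c rest ih =>
    simp only [pvLoopB]
    split_ifs with h1 h2
    · rw [PySem.Set.contains_iff] at h1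
      simp only [true_iff]
      exact ⟨c, by simp, Or.inl h1⟩
    · rw [List.any_eq_true] at h2
      obtain ⟨p, hp, hsw⟩ := h2
      simp only [true_iff]
      exact ⟨c, by simp, Or.inr ⟨p, hp, hsw⟩⟩
    · rw [ih]
      constructor
      · rintro ⟨c', hc', h⟩; exact ⟨c', by simp [hc'], h⟩
      · rintro ⟨c', hc', h⟩
        rcases List.mem_cons.mp hc' with rfl | hc'
        · exfalso
          rcases h with hmem | ⟨p, hp, hsw⟩
          · exact h1 ((PySem.Set.contains_iff _ _).mpr hmem)
          · exact h2 (List.any_eq_true.mpr ⟨p, hp, hsw⟩)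
        · exact ⟨c', hc', h⟩

theorem pvAlt_iff (ef cf : List String) :
    changed_expected_file_py_alt ef cf = true ↔ ∃ e ∈ ef, ∃ c ∈ cf, pvHit e c := by
  unfold changed_expected_file_py_alt
  rw [pvBuild_eq, pvLoopB_iff]
  constructor
  · rintro ⟨c, hc, h⟩
    rcases h with hmem | ⟨p, hp, hsw⟩
    · rw [PySem.Set.mem_foldl_add] at hmem
      rcases hmem with h | ⟨e, he, heq⟩
      · simp [PySem.Set.empty] at h
      · exact ⟨e, he, c, hc, Or.inl heq.symm⟩
    · simp only [List.nil_append, List.mem_filter, List.mem_map] at hp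
      obtain ⟨⟨e, he, rfl⟩, hend⟩ := hp
      exact ⟨e, he, c, hc, Or.inr ⟨hend, hsw⟩⟩
  · rintro ⟨e, he, c, hc, hit⟩
    refine ⟨c, hc, ?_⟩
    rcases hit with heq | ⟨hend, hsw⟩
    · exact Or.inl ((PySem.Set.mem_foldl_add _ _ _ _).mpr (Or.inr ⟨e, he, heq.symm⟩))
    · exact Or.inr ⟨pvNorm e, by
        simp only [List.nil_append, List.mem_filter, List.mem_map]
        exact ⟨⟨e, he, rfl⟩, hend⟩, hsw⟩

-- ===== VERDICT (by name: the statement is the Claim_ definition above) =====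
theorem changed_expected_file_py_spec : Claim_equal_changed_expected_file_py := by
  intro ef cf _
  unfold Spec_changed_expected_file_py changed_expected_file_py
  rw [Bool.eq_iff_iff, pvLoopA_iff, pvAlt_iff]
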